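-- pv_equiv track=rewrite | github.com/IStoleYourCookie/SimPyChat | test.py | find_negative
-- ===== SOURCE A (Python) =====
-- bad = ["black", "old", "stop", "cold", "cut", "fall", "far", "hot", "hurt", "never",
--         "bear", "fire", "night", "rain", "snow", "wind", "hate", "bad", "die", "death"]
--
-- good = ["funny", "eat", "good", "pretty", "white", "fly", "know", "live", "thank", "best", "fast", "first", "sing", "sleep", "better", "clean",
--          "full", "drink", "kind", "laugh", "light", "own", "start", "together", "warm",
--          "apple", "baby", "bed", "bird, birthday", "cake", "children", "Christmas", "father", "flower", "game", "garden", "home", "kitty", "money",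
--          "mother", "party", "Santa Claus", "song", "sun", "toy", "beautiful", "like", "love", "well"]
--
-- def score(input):
--     points = 0
--     for s in input:
--         if s in bad:
--             points -= 1
--         elif s in good:
--             points += 1
--     return points
--
-- def score_words(input):
--     default = score(input)
--     points = []
--     for s in input:
--         if s in bad:
--             points.append(default - 1)
--         elif s in good:
--             points.append(default + 1)
--         else:
--             points.append(default)
--     return points
--
-- def find_negative(input):
--     points = score_words(input)
--     i = 0
--     worse = []
--     default = score(input)
--     for s in input:
--         if points[i] < default:
--             worse.append(s)
--         i += 1
--
--     worse.sort()
--     return worse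
-- ===== SOURCE B (Python) =====
-- bad = ["black", "old", "stop", "cold", "cut", "fall", "far", "hot", "hurt", "never",
--         "bear", "fire", "night", "rain", "snow", "wind", "hate", "bad", "die", "death"]
--
-- def find_negative(input):
--     return sorted(s for s in input if s in bad)
-- ===== Notes on version B (the rewrite author's own statement) =====
-- stated objective: simpler
-- what changed: Replaces the three interleaved passes (total score, per-word score list, indexed comparison loop) with a single filtering pass: the per-word score is below the default exactly when the word is in `bad`, so B is just `sorted(s for s in input if s in bad)`.
import Mathlib
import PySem

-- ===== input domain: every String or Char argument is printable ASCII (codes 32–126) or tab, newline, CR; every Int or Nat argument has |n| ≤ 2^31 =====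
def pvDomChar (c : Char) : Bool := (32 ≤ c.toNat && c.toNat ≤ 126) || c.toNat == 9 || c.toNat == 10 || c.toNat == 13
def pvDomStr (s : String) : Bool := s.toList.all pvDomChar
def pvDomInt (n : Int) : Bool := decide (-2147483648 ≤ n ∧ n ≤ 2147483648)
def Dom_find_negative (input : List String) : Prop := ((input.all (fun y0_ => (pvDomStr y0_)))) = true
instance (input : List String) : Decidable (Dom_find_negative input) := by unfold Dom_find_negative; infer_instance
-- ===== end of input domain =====

-- B is simpler: the per-word score is below the default exactly when the word is in `bad`,
-- so B filters once and sorts, skipping the score/score_words helpers entirely.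

-- ===== PORT A =====
def badList : List String := ["black", "old", "stop", "cold", "cut", "fall", "far", "hot", "hurt", "never",
        "bear", "fire", "night", "rain", "snow", "wind", "hate", "bad", "die", "death"]

def goodList : List String := ["funny", "eat", "good", "pretty", "white", "fly", "know", "live", "thank", "best", "fast", "first", "sing", "sleep", "better", "clean",
         "full", "drink", "kind", "laugh", "light", "own", "start", "together", "warm",
         "apple", "baby", "bed", "bird, birthday", "cake", "children", "Christmas", "father", "flower", "game", "garden", "home", "kitty", "money",
         "mother", "party", "Santa Claus", "song", "sun", "toy", "beautiful", "like", "love", "well"]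

def score (input : List String) : Int :=
  input.foldl (fun points s =>
    if badList.contains s then points - 1
    else if goodList.contains s then points + 1
    else points) 0

def score_words (input : List String) : List Int :=
  let default := score input
  input.foldl (fun points s =>
    if badList.contains s then points ++ [default - 1]
    else if goodList.contains s then points ++ [default + 1]
    else points ++ [default]) []

def find_negative (input : List String) : List String :=
  let points := score_words input
  let default := score input
  -- points[i] is always in range (points has the same length as input), so the
  -- IndexError case of pyGet? never occurs; .getD 0 only discharges the Option.
  let st := input.foldl (fun (st : Int × List String) s =>
    if (PySem.List.pyGet? points st.1).getD 0 < default then (st.1 + 1, st.2 ++ [s])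
    else (st.1 + 1, st.2)) (0, [])
  PySem.List.sorted st.2 (fun x => x) false

-- ===== PORT B =====
def find_negative_alt (input : List String) : List String :=
  PySem.List.sorted (input.filter (fun s => badList.contains s)) (fun x => x) false

-- ===== PRECONDITION & SPEC =====
def Spec_find_negative (input : List String) (out : List String) : Prop := out = find_negative_alt input
instance (input : List String) (out : List String) : Decidable (Spec_find_negative input out) := by unfold Spec_find_negative; infer_instance

-- ===== CLAIM (what is proved, stated in full; the proofs are below) =====
def Claim_equal_find_negative : Prop := ∀ (input : List String), Dom_find_negative input → Spec_find_negative input (find_negative input)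

-- ===== LEMMAS AND PROOFS =====

-- the per-word score assigned by score_words
def wordScore (d : Int) (s : String) : Int :=
  if badList.contains s then d - 1
  else if goodList.contains s then d + 1
  else d

theorem score_words_eq_map (input : List String) :
    score_words input = input.map (wordScore (score input)) := by
  unfold score_words
  show (input.foldl (fun points s =>
      if badList.contains s then points ++ [score input - 1]
      else if goodList.contains s then points ++ [score input + 1]
      else points ++ [score input]) []) = _
  have hf : (fun (points : List Int) s =>
      if badList.contains s then points ++ [score input - 1]
      else if goodList.contains s then points ++ [score input + 1]
      else points ++ [score input])
      = fun points s => points ++ [wordScore (score input) s] := by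
    funext points s; unfold wordScore; split_ifs <;> rfl
  rw [hf]
  simpa using PySem.List.foldl_append_singleton_eq_map (f := wordScore (score input)) (l := input) (acc := [])

-- the indexed collection loop of A collects exactly the words whose score is < d
theorem collect_loop (d : Int) (f : String → Int) :
    ∀ (l pre : List String) (w : List String),
    (l.foldl (fun (st : Int × List String) s =>
      if (PySem.List.pyGet? ((pre ++ l).map f) st.1).getD 0 < d then (st.1 + 1, st.2 ++ [s])
      else (st.1 + 1, st.2)) ((pre.length : Int), w)).2
    = w ++ l.filter (fun s => decide (f s < d)) := by
  intro l
  induction l with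
  | nil => intro pre w; simp
  | cons x t ih =>
    intro pre w
    have hget : PySem.List.pyGet? ((pre ++ x :: t).map f) ((pre.length : Int)) = some (f x) := by
      have : (pre ++ x :: t).map f = pre.map f ++ f x :: t.map f := by simp
      rw [this]
      have := PySem.List.pyGet?_append_length (pre := pre.map f) (y := f x) (ys := t.map f)
      simpa using this
    simp only [List.foldl_cons, hget, Option.getD_some]
    have hlen : ((pre.length : Int) + 1) = (((pre ++ [x]).length : Int)) := by
      simp
    by_cases h : f x < d
    · simp only [if_pos h, hlen]
      have := ih (pre ++ [x]) (w ++ [x])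
      simp only [List.append_assoc, List.cons_append, List.nil_append] at this ⊢
      rw [this]
      simp [h]
    · simp only [if_neg h, hlen]
      have := ih (pre ++ [x]) w
      simp only [List.append_assoc, List.cons_append, List.nil_append] at this ⊢
      rw [this]
      simp [h]

theorem wordScore_lt_iff (d : Int) (s : String) :
    wordScore d s < d ↔ badList.contains s = true := by
  unfold wordScore
  split_ifs with hb hg
  · exact ⟨fun _ => hb, fun _ => by omega⟩
  · exact ⟨fun hlt => absurd hlt (by omega), fun hc => absurd hc hb⟩
  · exact ⟨fun hlt => absurd hlt (by omega), fun hc => absurd hc hb⟩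

-- ===== VERDICT (by name: the statement is the Claim_ definition above) =====
theorem find_negative_spec : Claim_equal_find_negative := by
  intro input _
  have h := collect_loop (score input) (wordScore (score input)) input [] []
  simp only [List.length_nil, Int.natCast_zero, List.nil_append] at h
  have h' : List.filter (fun s => decide (wordScore (score input) s < score input)) input
      = List.filter (fun s => badList.contains s) input := by
    apply List.filter_congr
    intro s _
    simp [wordScore_lt_iff]
  unfold Spec_find_negative find_negative find_negative_alt
  simp only [score_words_eq_map]
  exact congrArg (fun l => PySem.List.sorted l (fun x => x) false) (h.trans h')
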